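-- pv_equiv track=rewrite | github.com/gomgomigom/BOJ | brute/chess.py | count_six
-- ===== SOURCE A (Python) =====
-- def count_six(s):
--     count = 0
--     for i in s:
--         if i == "6":
--             count += 1
--         else:
--             count = 0
--     return count
-- ===== SOURCE B (Python) =====
-- def count_six(s):
--     count = 0
--     for c in reversed(s):
--         if c != "6":
--             break
--         count += 1
--     return count
-- ===== Notes on version B (the rewrite author's own statement) =====
-- stated objective: faster
-- what changed: B scans the string from the right and stops at the first character that is not a six, instead of A's full left-to-right scan that resets a counter on each such character.
import Mathlib
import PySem

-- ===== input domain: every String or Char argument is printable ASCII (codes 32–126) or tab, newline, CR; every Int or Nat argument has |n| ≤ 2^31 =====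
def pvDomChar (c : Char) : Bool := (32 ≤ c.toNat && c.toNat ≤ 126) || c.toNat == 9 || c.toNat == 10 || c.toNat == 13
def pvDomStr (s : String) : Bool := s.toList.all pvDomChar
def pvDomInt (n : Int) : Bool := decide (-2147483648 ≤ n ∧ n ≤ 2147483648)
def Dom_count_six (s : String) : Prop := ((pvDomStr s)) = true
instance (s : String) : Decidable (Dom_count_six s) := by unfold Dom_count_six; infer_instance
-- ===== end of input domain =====

-- B scans from the right and stops at the first non-'6'; A scans left-to-right resetting the counter. Return values proved equal.

-- ===== PORT A =====
-- left-to-right fold: count += 1 on '6', reset to 0 otherwise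
def count_six (s : String) : Int :=
  s.toList.foldl (fun count i => if i = '6' then count + 1 else 0) 0

-- ===== PORT B =====
-- reverse scan counting the trailing run, stopping at the first non-'6'
def countSixAltGo : List Char → Int
  | [] => 0
  | c :: rest => if c ≠ '6' then 0 else countSixAltGo rest + 1

def count_six_alt (s : String) : Int := countSixAltGo s.toList.reverse

-- ===== PRECONDITION & SPEC =====
def Spec_count_six (s : String) (out : Int) : Prop := out = count_six_alt s
instance (s : String) (out : Int) : Decidable (Spec_count_six s out) := by unfold Spec_count_six; infer_instance

-- ===== CLAIM (what is proved, stated in full; the proofs are below) =====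
def Claim_equal_count_six : Prop := ∀ (s : String), Dom_count_six s → Spec_count_six s (count_six s)

-- ===== LEMMAS AND PROOFS =====

theorem foldl_eq_go (l : List Char) (acc : Int) :
    l.foldl (fun count i => if i = '6' then count + 1 else 0) acc
      = countSixAltGo l.reverse + (if l.all (· = '6') then acc else 0) := by
  induction l using List.reverseRecOn generalizing acc with
  | nil => simp [countSixAltGo]
  | append_singleton l c ih =>
    rw [List.foldl_append]
    simp only [List.foldl_cons, List.foldl_nil, List.reverse_append, List.reverse_singleton,
      List.singleton_append, countSixAltGo, List.all_append, List.all_cons, List.all_nil]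
    by_cases hc : c = '6'
    · subst hc
      simp only [ih]
      by_cases h : l.all (· = '6') = true <;> simp [h] <;> ring
    · simp [hc]

-- ===== VERDICT (by name: the statement is the Claim_ definition above) =====
theorem count_six_spec : Claim_equal_count_six := by
  intro s _
  unfold Spec_count_six count_six count_six_alt
  rw [foldl_eq_go]
  by_cases h : s.toList.all (· = '6') = true <;> simp [h]
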